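-- pv_equiv track=rewrite | github.com/rf-iasys/OEIS | brute_max_y_streamer.py | compute_max_y
-- ===== SOURCE A (Python) =====
-- import math
--
-- def compute_max_y(n_start: int, n_end: int) -> dict[int,int]:
--     """Compute max_y(x) using the combinatorial formula; return as dict."""
--     max_y_per_x = dict()
--     n_isqrt = math.isqrt(n_end)
--     for a in range(n_end // 2):
--         for b in range(a + 1, a + 1 + n_isqrt):
--             x = abs(a**2 - b**2)
--             y = x * abs(b - a)
--             if y == 0:
--                 continue
--             # Only store x if it's within the desired range
--             if n_start <= x < n_end:
--                 if y > max_y_per_x.get(x, 0):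
--                     max_y_per_x[x] = y
--     return max_y_per_x
-- ===== SOURCE B (Python) =====
-- import math
--
-- def compute_max_y(n_start: int, n_end: int) -> dict[int, int]:
--     """Compute max_y(x) by walking, for each a, only the d-window whose x lands
--     below n_end (window bound found in closed form with isqrt), tracking
--     x = d*(2a+d) additively instead of via squares."""
--     res = {}
--     r = math.isqrt(n_end)
--     for a in range(n_end // 2):
--         # largest d with d*(2a+d) < n_end, i.e. (a+d)^2 <= n_end + a^2 - 1, capped at r
--         d_hi = min(r, math.isqrt(n_end + a * a - 1) - a)
--         x = 2 * a + 1  # x for d = 1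
--         for d in range(1, d_hi + 1):
--             if x >= n_start:
--                 y = x * d
--                 if y > res.get(x, 0):
--                     res[x] = y
--             x += 2 * (a + d) + 1
--         # a+=1 implicit
--     return res
-- ===== Notes on version B (the rewrite author's own statement) =====
-- stated objective: faster
-- what changed: Instead of scanning all isqrt(n_end) b-values per a and filtering x into range, B computes in closed form (via isqrt) the largest d with d*(2a+d) < n_end and walks only that window, tracking x additively instead of recomputing squares.
import Mathlib
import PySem

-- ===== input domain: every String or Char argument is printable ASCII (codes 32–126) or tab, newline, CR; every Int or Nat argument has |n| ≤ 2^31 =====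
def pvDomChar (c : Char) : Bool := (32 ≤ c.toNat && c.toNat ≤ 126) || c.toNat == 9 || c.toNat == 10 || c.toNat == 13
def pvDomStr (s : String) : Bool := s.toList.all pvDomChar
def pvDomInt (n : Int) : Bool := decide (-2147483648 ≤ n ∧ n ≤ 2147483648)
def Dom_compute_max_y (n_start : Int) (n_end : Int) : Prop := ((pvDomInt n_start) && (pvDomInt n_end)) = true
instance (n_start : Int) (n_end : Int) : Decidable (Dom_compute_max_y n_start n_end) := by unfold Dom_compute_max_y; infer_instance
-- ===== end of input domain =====

-- B replaces A's full √n-wide inner scan (with its range filter) by walking, per a,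
-- only the d-window whose x lands below n_end (window bound in closed form via isqrt),
-- tracking x additively; measured asymptotically faster in a timing run.
-- math.isqrt: exact for arguments ≥ 0 (Pre_ guarantees every call site; Python raises for < 0)
def pyIsqrt (n : Int) : Int := (Nat.sqrt n.toNat : Int)

-- ===== PORT A =====
def compute_max_y (n_start : Int) (n_end : Int) : List (Int × Int) :=
  let n_isqrt := pyIsqrt n_end
  ((PySem.List.pyRange 0 (PySem.Int.floordiv n_end 2) 1).foldl (fun md a =>
    (PySem.List.pyRange (a + 1) (a + 1 + n_isqrt) 1).foldl (fun md b =>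
      let x := |a ^ 2 - b ^ 2|
      let y := x * |b - a|
      if y = 0 then md
      else if n_start ≤ x ∧ x < n_end then
        (if y > md.getD x 0 then md.insert x y else md)
      else md) md) (PySem.Dict.empty : PySem.Dict Int Int)).items

-- ===== PORT B =====
def compute_max_y_alt (n_start : Int) (n_end : Int) : List (Int × Int) :=
  let r := pyIsqrt n_end
  ((PySem.List.pyRange 0 (PySem.Int.floordiv n_end 2) 1).foldl (fun md a =>
    let d_hi := min r (pyIsqrt (n_end + a * a - 1) - a)
    ((PySem.List.pyRange 1 (d_hi + 1) 1).foldl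
      (fun (st : Int × PySem.Dict Int Int) d =>
        let md' := if st.1 ≥ n_start then
            (if st.1 * d > st.2.getD st.1 0 then st.2.insert st.1 (st.1 * d) else st.2)
          else st.2
        (st.1 + 2 * (a + d) + 1, md'))
      (2 * a + 1, md)).2) (PySem.Dict.empty : PySem.Dict Int Int)).items

-- ===== PRECONDITION & SPEC =====
-- Pre_: math.isqrt(n_end) raises ValueError for n_end < 0 (in both A and B).
def Pre_compute_max_y (n_start : Int) (n_end : Int) : Prop := 0 ≤ n_end
instance (n_start : Int) (n_end : Int) : Decidable (Pre_compute_max_y n_start n_end) := by unfold Pre_compute_max_y; infer_instance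
def pvWitness_compute_max_y : Int × Int := (3, 40)

def Spec_compute_max_y (n_start : Int) (n_end : Int) (out : List (Int × Int)) : Prop := out = compute_max_y_alt n_start n_end
instance (n_start : Int) (n_end : Int) (out : List (Int × Int)) : Decidable (Spec_compute_max_y n_start n_end out) := by unfold Spec_compute_max_y; infer_instance

-- ===== CLAIM (what is proved, stated in full; the proofs are below) =====
def Claim_equal_compute_max_y : Prop := ∀ (n_start : Int) (n_end : Int), Dom_compute_max_y n_start n_end → Pre_compute_max_y n_start n_end → Spec_compute_max_y n_start n_end (compute_max_y n_start n_end)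

-- ===== LEMMAS AND PROOFS =====

-- the common per-(a,d) step both inner loops reduce to
def stepD (n_start n_end : Int) (a : Int) (md : PySem.Dict Int Int) (d : Int) : PySem.Dict Int Int :=
  let x := d * (2 * a + d)
  if n_start ≤ x ∧ x < n_end then
    (if x * d > md.getD x 0 then md.insert x (x * d) else md)
  else md

-- like stepD but without the upper-range test (B's body, x already substituted)
def stepD' (n_start : Int) (a : Int) (md : PySem.Dict Int Int) (d : Int) : PySem.Dict Int Int :=
  let x := d * (2 * a + d)
  if x ≥ n_start then
    (if x * d > md.getD x 0 then md.insert x (x * d) else md)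
  else md

lemma foldl_pyRange_shift {β : Type} (f : β → Int → β) (c lo hi : Int) (init : β) :
    (PySem.List.pyRange (c + lo) (c + hi) 1).foldl f init
      = (PySem.List.pyRange lo hi 1).foldl (fun s d => f s (c + d)) init := by
  rw [PySem.List.pyRange_one, PySem.List.pyRange_one]
  have h : c + hi - (c + lo) = hi - lo := by ring
  rw [h, List.foldl_map, List.foldl_map]
  apply PySem.List.foldl_congr_mem <;> intro a x _ <;> simp [add_assoc]

lemma foldl_id_of_mem {β : Type} (f : β → Int → β) (l : List Int) (init : β)
    (h : ∀ s x, x ∈ l → f s x = s) : l.foldl f init = init := by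
  induction l generalizing init with
  | nil => rfl
  | cons y t ih =>
      simp only [List.foldl_cons]
      rw [h init y (by simp), ih]
      intro s x hx; exact h s x (List.mem_cons_of_mem _ hx)


lemma pyIsqrt_le_iff {m k : Int} (hm : 0 ≤ m) (hk : 0 ≤ k) : k ≤ pyIsqrt m ↔ k * k ≤ m := by
  obtain ⟨K, rfl⟩ := Int.eq_ofNat_of_zero_le hk
  obtain ⟨M, rfl⟩ := Int.eq_ofNat_of_zero_le hm
  unfold pyIsqrt
  rw [Int.toNat_natCast]
  exact_mod_cast Nat.le_sqrt

-- B's inner pair-state fold computes exactly the stepD' fold (first component = d*(2a+d))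
lemma pair_fold (s a : Int) (k : Nat) : ∀ (lo hi : Int) (md : PySem.Dict Int Int),
    (hi - lo).toNat = k →
    ((PySem.List.pyRange lo hi 1).foldl
      (fun (st : Int × PySem.Dict Int Int) d =>
        let md' := if st.1 ≥ s then
            (if st.1 * d > st.2.getD st.1 0 then st.2.insert st.1 (st.1 * d) else st.2)
          else st.2
        (st.1 + 2 * (a + d) + 1, md')) (lo * (2 * a + lo), md)).2
    = (PySem.List.pyRange lo hi 1).foldl (stepD' s a) md := by
  induction k with
  | zero =>
      intro lo hi md h
      rw [PySem.List.pyRange_one_eq_nil (by omega)]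
      rfl
  | succ j ih =>
      intro lo hi md h
      rw [PySem.List.pyRange_one_cons (by omega)]
      simp only [List.foldl_cons]
      have hx : lo * (2 * a + lo) + 2 * (a + lo) + 1 = (lo + 1) * (2 * a + (lo + 1)) := by ring
      rw [hx]
      rw [ih (lo + 1) hi _ (by omega)]
      rfl

-- the per-a inner loops of the two ports agree
lemma inner_eq (s n a : Int) (hn : 0 ≤ n) (ha : 0 ≤ a) (han : 2 * a + 2 ≤ n)
    (md : PySem.Dict Int Int) :
    (PySem.List.pyRange (a + 1) (a + 1 + pyIsqrt n) 1).foldl (fun md b =>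
      let x := |a ^ 2 - b ^ 2|
      let y := x * |b - a|
      if y = 0 then md
      else if s ≤ x ∧ x < n then
        (if y > md.getD x 0 then md.insert x y else md)
      else md) md
    = ((PySem.List.pyRange 1 (min (pyIsqrt n) (pyIsqrt (n + a * a - 1) - a) + 1) 1).foldl
      (fun (st : Int × PySem.Dict Int Int) d =>
        let md' := if st.1 ≥ s then
            (if st.1 * d > st.2.getD st.1 0 then st.2.insert st.1 (st.1 * d) else st.2)
          else st.2
        (st.1 + 2 * (a + d) + 1, md')) (2 * a + 1, md)).2 := by
  have hm : (0:Int) ≤ n + a * a - 1 := by nlinarith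
  have hr0 : 0 ≤ pyIsqrt n := by unfold pyIsqrt; positivity
  set r := pyIsqrt n with hr
  set q := pyIsqrt (n + a * a - 1) with hq
  have hq1 : a + 1 ≤ q := by
    rw [hq]
    have := (pyIsqrt_le_iff hm (by omega : (0:Int) ≤ a + 1)).mpr (by nlinarith)
    omega
  set dh := min r (q - a) with hdh
  have hdh0 : 0 ≤ dh := by omega
  -- LHS: shift b = a + d, then each step is stepD
  have h1 : a + 1 + r = a + (1 + r) := by ring
  rw [h1, foldl_pyRange_shift]
  have hL : (PySem.List.pyRange 1 (1 + r) 1).foldl (fun md d =>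
      let x := |a ^ 2 - (a + d) ^ 2|
      let y := x * |a + d - a|
      if y = 0 then md
      else if s ≤ x ∧ x < n then
        (if y > md.getD x 0 then md.insert x y else md)
      else md) md
      = (PySem.List.pyRange 1 (1 + r) 1).foldl (stepD s n a) md := by
    apply PySem.List.foldl_congr_mem
    intro acc d hd
    rw [PySem.List.mem_pyRange_one] at hd
    have hd1 : 1 ≤ d := hd.1
    have hxe : a ^ 2 - (a + d) ^ 2 = -(d * (2 * a + d)) := by ring
    have hxpos : 0 < d * (2 * a + d) := by nlinarith
    simp only [hxe, abs_neg, add_sub_cancel_left, abs_of_pos hxpos,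
      abs_of_pos (by omega : (0:Int) < d)]
    have hy0 : ¬ (d * (2 * a + d) * d = 0) := by nlinarith
    rw [if_neg hy0]
    unfold stepD
    rfl
  rw [hL]
  -- trim the tail of the range: steps with dh < d are identity
  have hsplit : PySem.List.pyRange 1 (1 + r) 1
      = PySem.List.pyRange 1 (dh + 1) 1 ++ PySem.List.pyRange (dh + 1) (1 + r) 1 := by
    apply PySem.List.pyRange_one_append <;> omega
  rw [hsplit, List.foldl_append]
  have htail : ∀ (M : PySem.Dict Int Int),
      (PySem.List.pyRange (dh + 1) (1 + r) 1).foldl (stepD s n a) M = M := by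
    intro M
    apply foldl_id_of_mem
    intro acc d hd
    rw [PySem.List.mem_pyRange_one] at hd
    have hdr : d ≤ r := by omega
    have hdq : q - a < d := by omega
    have hxn : n ≤ d * (2 * a + d) := by
      by_contra hlt
      rw [not_le] at hlt
      have : a + d ≤ q := by
        rw [hq]
        exact (pyIsqrt_le_iff hm (by omega : (0:Int) ≤ a + d)).mpr (by nlinarith)
      omega
    unfold stepD
    rw [if_neg (by omega)]
  rw [htail]
  -- RHS: collapse the pair-state fold, then match step functions on the window
  have hpair := pair_fold s a (dh + 1 - 1).toNat 1 (dh + 1) md rfl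
  have h3 : (1:Int) * (2 * a + 1) = 2 * a + 1 := by ring
  rw [h3] at hpair
  rw [hpair]
  apply PySem.List.foldl_congr_mem
  intro acc d hd
  rw [PySem.List.mem_pyRange_one] at hd
  have hdq : d ≤ q - a := by omega
  have hxn : d * (2 * a + d) < n := by
    have : (a + d) * (a + d) ≤ n + a * a - 1 :=
      (pyIsqrt_le_iff hm (by omega : (0:Int) ≤ a + d)).mp (by omega)
    nlinarith
  unfold stepD stepD'
  simp only [ge_iff_le]
  by_cases hs : s ≤ d * (2 * a + d)
  · rw [if_pos ⟨hs, hxn⟩, if_pos hs]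
  · rw [if_neg (by tauto), if_neg hs]

theorem compute_max_y_spec : Claim_equal_compute_max_y := by
  intro s n _ hn
  unfold Spec_compute_max_y compute_max_y compute_max_y_alt
  have key : (PySem.List.pyRange 0 (PySem.Int.floordiv n 2) 1).foldl
      (fun md a => (PySem.List.pyRange (a + 1) (a + 1 + pyIsqrt n) 1).foldl (fun md b =>
        let x := |a ^ 2 - b ^ 2|
        let y := x * |b - a|
        if y = 0 then md
        else if s ≤ x ∧ x < n then
          (if y > md.getD x 0 then md.insert x y else md)
        else md) md)
      (PySem.Dict.empty : PySem.Dict Int Int)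
    = (PySem.List.pyRange 0 (PySem.Int.floordiv n 2) 1).foldl
      (fun md a =>
        ((PySem.List.pyRange 1 (min (pyIsqrt n) (pyIsqrt (n + a * a - 1) - a) + 1) 1).foldl
          (fun (st : Int × PySem.Dict Int Int) d =>
            let md' := if st.1 ≥ s then
                (if st.1 * d > st.2.getD st.1 0 then st.2.insert st.1 (st.1 * d) else st.2)
              else st.2
            (st.1 + 2 * (a + d) + 1, md')) (2 * a + 1, md)).2)
      (PySem.Dict.empty : PySem.Dict Int Int) := by
    apply PySem.List.foldl_congr_mem
    intro md a ha
    rw [PySem.List.mem_pyRange_one] at ha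
    have h2 : PySem.Int.floordiv n 2 = n / 2 := PySem.Int.floordiv_eq_ediv_of_pos (by omega)
    rw [h2] at ha
    have han : 2 * a + 2 ≤ n := by omega
    exact inner_eq s n a hn ha.1 han md
  exact congrArg PySem.Dict.items key
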